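-- pv_equiv track=rewrite | github.com/Wonji1/coding-test | coupang3.py | solution
-- ===== SOURCE A (Python) =====
-- def solution(k,score):
--     answer = 0
--     dic ={}
--     cnt = 0
--     for i in range(1, len(score)):
--         gap = score[i-1] - score[i]
--         if gap not in dic.keys():
--             dic[gap] = [1,0,i]
--         else:
--             if dic[gap][2] +1 == i:
--                 dic[gap][1] +=1
--                 dic[gap][2] = i
--                 cnt +=1
--             dic[gap][0] += 1
--     for d in dic:
--         if dic[d][0] >= k:
--             answer = answer + dic[d][0] *2 - cnt
--         else:
--             answer += dic[d][1]
--     return len(score) - answer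
-- ===== SOURCE B (Python) =====
-- def solution(k, score):
--     # Pass 1: group the positions i (1..len-1) by their gap value.
--     groups = {}
--     for i in range(1, len(score)):
--         gap = score[i - 1] - score[i]
--         groups.setdefault(gap, []).append(i)
--     # Pass 2: per gap, its occurrence count and the length of the initial
--     # run of consecutive positions; cnt is the global total of runs.
--     stats = []
--     cnt = 0
--     for idxs in groups.values():
--         a = 0
--         while a + 1 < len(idxs) and idxs[a + 1] == idxs[a] + 1:
--             a += 1
--         stats.append((len(idxs), a))
--         cnt += a
--     # Pass 3: score each gap.
--     answer = 0
--     for c, a in stats: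
--         answer += c * 2 - cnt if c >= k else a
--     return len(score) - answer
-- ===== Notes on version B (the rewrite author's own statement) =====
-- stated objective: alternative
-- what changed: A interleaves grouping, adjacency tracking and a [count,adj,last] triple per gap in one stateful loop; B first groups positions by gap into index lists in one pass, then derives each gap's count and initial consecutive-run length in a second pass, then scores in a third.
import Mathlib
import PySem

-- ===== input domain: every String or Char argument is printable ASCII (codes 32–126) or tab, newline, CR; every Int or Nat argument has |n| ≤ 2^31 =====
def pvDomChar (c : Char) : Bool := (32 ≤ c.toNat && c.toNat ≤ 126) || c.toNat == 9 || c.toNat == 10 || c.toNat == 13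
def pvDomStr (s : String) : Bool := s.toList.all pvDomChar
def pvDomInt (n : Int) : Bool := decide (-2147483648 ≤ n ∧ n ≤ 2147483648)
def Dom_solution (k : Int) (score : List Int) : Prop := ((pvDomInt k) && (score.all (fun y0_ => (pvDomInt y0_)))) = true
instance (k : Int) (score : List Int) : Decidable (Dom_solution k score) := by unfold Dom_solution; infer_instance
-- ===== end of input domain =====

-- B splits A's interleaved grouping/adjacency loop into separate passes: group positions by gap,
-- then compute per-gap counts and initial-run lengths, then score; same results, objective: alternative.

-- ===== PORT A =====
-- all indices i, i-1 lie in range, so pyGetD with default 0 is exact (Python never raises here)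
def solution (k : Int) (score : List Int) : Int :=
  let st := (PySem.List.pyRange 1 (score.length : Int) 1).foldl
    (fun (st : PySem.Dict Int (Int × Int × Int) × Int) i =>
      let gap := PySem.List.pyGetD score (i - 1) 0 - PySem.List.pyGetD score i 0
      match st.1.get? gap with
      | none => (st.1.insert gap ((1 : Int), (0 : Int), i), st.2)
      | some v =>
        if v.2.2 + 1 = i then
          (st.1.insert gap (v.1 + 1, v.2.1 + 1, i), st.2 + 1)
        else
          (st.1.insert gap (v.1 + 1, v.2.1, v.2.2), st.2))
    (PySem.Dict.empty, 0)
  let answer := st.1.items.foldl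
    (fun ans p => if p.2.1 ≥ k then ans + p.2.1 * 2 - st.2 else ans + p.2.2.1) 0
  (score.length : Int) - answer

-- ===== PORT B =====
-- the 'while a+1 < len(idxs) and idxs[a+1] == idxs[a]+1: a += 1' loop of Source B
def prefRun : List Int → Int
  | x :: y :: rest => if y = x + 1 then prefRun (y :: rest) + 1 else 0
  | _ => 0

def solution_alt (k : Int) (score : List Int) : Int :=
  let groups := (PySem.List.pyRange 1 (score.length : Int) 1).foldl
    (fun (g : PySem.Dict Int (List Int)) i =>
      let gap := PySem.List.pyGetD score (i - 1) 0 - PySem.List.pyGetD score i 0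
      g.modify gap [] (fun l => l ++ [i]))
    PySem.Dict.empty
  let st := groups.values.foldl
    (fun (st : List (Int × Int) × Int) idxs =>
      let a := prefRun idxs
      (st.1 ++ [((idxs.length : Int), a)], st.2 + a)) ([], 0)
  let answer := st.1.foldl
    (fun ans p => if p.1 ≥ k then ans + p.1 * 2 - st.2 else ans + p.2) 0
  (score.length : Int) - answer

-- ===== PRECONDITION & SPEC =====
def Spec_solution (k : Int) (score : List Int) (out : Int) : Prop := out = solution_alt k score
instance (k : Int) (score : List Int) (out : Int) : Decidable (Spec_solution k score out) := by unfold Spec_solution; infer_instance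

-- ===== CLAIM (what is proved, stated in full; the proofs are below) =====
def Claim_equal_solution : Prop := ∀ (k : Int) (score : List Int), Dom_solution k score → Spec_solution k score (solution k score)

-- ===== LEMMAS AND PROOFS =====

-- A's per-gap triple [count, adj, last] as a function of B's per-gap index list
def lastIdx (l : List Int) : Int := l.headD 0 + prefRun l
def phi (l : List Int) : Int × Int × Int := ((l.length : Int), prefRun l, lastIdx l)

-- the loop bodies of A's first loop and B's first pass, abstracted over the gap function
def stepA (key : Int → Int) (st : PySem.Dict Int (Int × Int × Int) × Int) (i : Int) :
    PySem.Dict Int (Int × Int × Int) × Int :=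
  match st.1.get? (key i) with
  | none => (st.1.insert (key i) ((1 : Int), (0 : Int), i), st.2)
  | some v =>
    if v.2.2 + 1 = i then
      (st.1.insert (key i) (v.1 + 1, v.2.1 + 1, i), st.2 + 1)
    else
      (st.1.insert (key i) (v.1 + 1, v.2.1, v.2.2), st.2)

def stepB (key : Int → Int) (g : PySem.Dict Int (List Int)) (i : Int) : PySem.Dict Int (List Int) :=
  g.modify (key i) [] (fun l => l ++ [i])

@[simp] lemma prefRun_nil : prefRun [] = 0 := rfl
@[simp] lemma prefRun_single (x : Int) : prefRun [x] = 0 := rfl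
lemma prefRun_cons_cons (x y : Int) (rest : List Int) :
    prefRun (x :: y :: rest) = if y = x + 1 then prefRun (y :: rest) + 1 else 0 := rfl

lemma headD_append_ne (l : List Int) (t : List Int) (d : Int) (h : l ≠ []) :
    (l ++ t).headD d = l.headD d := by
  cases l with
  | nil => exact absurd rfl h
  | cons a l' => rfl

lemma prefRun_append (i : Int) (l : List Int) (hne : l ≠ []) (hch : l.IsChain (· < ·))
    (hlt : ∀ x ∈ l, x < i) :
    prefRun (l ++ [i]) = if l.headD 0 + prefRun l + 1 = i then prefRun l + 1 else prefRun l := by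
  induction l with
  | nil => exact absurd rfl hne
  | cons x t ih =>
    cases t with
    | nil =>
      have hxi : x < i := hlt x (by simp)
      simp only [List.cons_append, List.nil_append, prefRun_cons_cons, prefRun_single,
        List.headD_cons]
      split_ifs with h1 h2 h2 <;> omega
    | cons y t' =>
      have hxy : x < y := (List.isChain_cons_cons.1 hch).1
      have hch' : (y :: t').IsChain (· < ·) := (List.isChain_cons_cons.1 hch).2
      have hlt' : ∀ z ∈ y :: t', z < i := fun z hz => hlt z (List.mem_cons_of_mem _ hz)
      have hyi : y < i := hlt' y (by simp)
      have ih' := ih (by simp) hch' hlt'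
      by_cases h : y = x + 1
      · simp only [List.cons_append, prefRun_cons_cons, h, if_true, List.headD_cons] at *
        rw [ih']
        split_ifs with h1 h2 h2 <;> omega
      · simp only [List.cons_append, prefRun_cons_cons, h, if_false, List.headD_cons]
        split_ifs with h1 <;> omega

lemma get?_map_phi (L : List (Int × List Int)) (x : Int) :
    (PySem.Dict.mk (L.map (fun p => (p.1, phi p.2)))).get? x
      = ((PySem.Dict.mk L).get? x).map phi := by
  induction L with
  | nil => rfl
  | cons p t ih =>
    obtain ⟨k0, v0⟩ := p
    simp only [List.map_cons, PySem.Dict.get?_mk_cons]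
    by_cases h : (k0 == x) = true
    · rw [if_pos h, if_pos h]; rfl
    · rw [if_neg h, if_neg h]; exact ih

lemma sum_update (G : List (Int × List Int)) (gap : Int) (l w : List Int)
    (hnd : (G.map (·.1)).Nodup) (hmem : (gap, l) ∈ G) :
    ((G.map (fun p => if p.1 == gap then (gap, w) else p)).map (fun p => prefRun p.2)).sum
      = (G.map (fun p => prefRun p.2)).sum - prefRun l + prefRun w := by
  induction G with
  | nil => simp at hmem
  | cons q t ih =>
    rw [List.map_cons, List.nodup_cons] at hnd
    by_cases h : q.1 = gap
    · have hq : q = (gap, l) := by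
        rcases List.mem_cons.1 hmem with hm | hm
        · exact hm.symm
        · exact absurd (h ▸ List.mem_map.2 ⟨(gap, l), hm, rfl⟩) hnd.1
      have htid : t.map (fun p => if p.1 == gap then (gap, w) else p) = t := by
        apply List.map_congr_left ?_ |>.trans (List.map_id t)
        intro p hp
        have : p.1 ≠ gap := fun hc => hnd.1 (h ▸ hc ▸ List.mem_map.2 ⟨p, hp, rfl⟩)
        simp [this]
      simp only [List.map_cons, beq_self_eq_true, if_true, htid, List.sum_cons, hq]
      omega
    · have hm : (gap, l) ∈ t := by
        rcases List.mem_cons.1 hmem with hm | hm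
        · exact absurd (by rw [← hm]) h
        · exact hm
      have hb : (q.1 == gap) = false := beq_eq_false_iff_ne.2 h
      simp only [List.map_cons, hb, Bool.false_eq_true, if_false, List.sum_cons, ih hnd.2 hm]
      omega

lemma map_phi_upd (G : List (Int × List Int)) (x : Int) (w : List Int) :
    ((G.map (fun p => if p.1 == x then (x, w) else p)).map (fun p => (p.1, phi p.2)))
      = (G.map (fun p => (p.1, phi p.2))).map (fun p => if p.1 == x then (x, phi w) else p) := by
  simp only [List.map_map]
  apply List.map_congr_left
  intro p _
  by_cases h : p.1 = x <;> simp [h]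

lemma map_fst_upd (G : List (Int × List Int)) (x : Int) (w : List Int) :
    (G.map (fun p => if p.1 == x then (x, w) else p)).map (·.1) = G.map (·.1) := by
  simp only [List.map_map]
  apply List.map_congr_left
  intro p _
  by_cases h : p.1 = x <;> simp [h]

lemma loop_inv (key : Int → Int) (is : List Int) :
    ∀ (g : PySem.Dict Int (List Int)) (dA : PySem.Dict Int (Int × Int × Int)) (cnt : Int),
    is.Pairwise (· < ·) →
    (g.items.map (·.1)).Nodup →
    (∀ p ∈ g.items, p.2 ≠ [] ∧ p.2.IsChain (· < ·) ∧ ∀ x ∈ p.2, ∀ j ∈ is, x < j) →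
    dA.items = g.items.map (fun p => (p.1, phi p.2)) →
    cnt = (g.items.map (fun p => prefRun p.2)).sum →
    (is.foldl (stepA key) (dA, cnt)).1.items
        = (is.foldl (stepB key) g).items.map (fun p => (p.1, phi p.2))
      ∧ (is.foldl (stepA key) (dA, cnt)).2
        = ((is.foldl (stepB key) g).items.map (fun p => prefRun p.2)).sum := by
  induction is with
  | nil => intro g dA cnt _ _ _ h4 h5; exact ⟨h4, h5⟩
  | cons i rest ih =>
    intro g dA cnt hpw hnd hgood h4 h5
    have hpw' := (List.pairwise_cons.1 hpw).2
    have hifut := (List.pairwise_cons.1 hpw).1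
    have hdA : dA = PySem.Dict.mk (g.items.map (fun p => (p.1, phi p.2))) := by
      cases dA; simpa using h4
    have hget : dA.get? (key i) = (g.get? (key i)).map phi := by
      rw [hdA]
      cases g
      exact get?_map_phi _ _
    simp only [List.foldl_cons]
    cases hg : g.get? (key i) with
    | none =>
      have hgetA : dA.get? (key i) = none := by rw [hget, hg]; rfl
      have hcg : g.contains (key i) = false := by
        rw [PySem.Dict.contains_eq_isSome_get?, hg]; rfl
      have hcA : dA.contains (key i) = false := by
        rw [PySem.Dict.contains_eq_isSome_get?, hgetA]; rfl
      have hA : stepA key (dA, cnt) i = (dA.insert (key i) ((1 : Int), (0 : Int), i), cnt) := by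
        simp only [stepA, hgetA]
      have hB : stepB key g i = g.insert (key i) [i] := by
        simp only [stepB, PySem.Dict.modify, PySem.Dict.getD_of_get?_eq_none g _ hg,
          List.nil_append]
      have hkeyout : ∀ p ∈ g.items, p.1 ≠ key i := by
        intro p hp hc
        have : g.contains (key i) = true := by
          simp only [PySem.Dict.contains, List.any_eq_true]
          exact ⟨p, hp, by simp [hc]⟩
        rw [hcg] at this; exact absurd this (by simp)
      rw [hA, hB]
      apply ih
      · exact hpw'
      · rw [PySem.Dict.items_insert_of_not_contains g _ hcg, List.map_append,
          List.nodup_append]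
        refine ⟨hnd, by simp, ?_⟩
        simp only [List.map_cons, List.map_nil]
        intro a ha
        simp only [List.mem_map] at ha
        obtain ⟨p, hp, hpa⟩ := ha
        rw [← hpa]
        intro b hb
        simp only [List.mem_singleton] at hb
        rw [hb]
        exact hkeyout p hp
      · intro p hp
        rw [PySem.Dict.items_insert_of_not_contains g _ hcg] at hp
        rcases List.mem_append.1 hp with hp | hp
        · obtain ⟨hne, hch, hlt⟩ := hgood p hp
          exact ⟨hne, hch, fun x hx j hj => hlt x hx j (List.mem_cons_of_mem _ hj)⟩
        · simp only [List.mem_singleton] at hp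
          subst hp
          refine ⟨by simp, by simp, ?_⟩
          intro x hx j hj
          simp only [List.mem_singleton] at hx
          subst hx
          exact hifut j hj
      · rw [PySem.Dict.items_insert_of_not_contains dA _ hcA,
          PySem.Dict.items_insert_of_not_contains g _ hcg, h4, List.map_append]
        simp [phi, lastIdx]
      · rw [PySem.Dict.items_insert_of_not_contains g _ hcg, List.map_append, List.sum_append]
        simp [h5]
    | some l =>
      have hgetA : dA.get? (key i) = some (phi l) := by rw [hget, hg]; rfl
      have hmem : (key i, l) ∈ g.items := PySem.Dict.mem_items_of_get?_eq_some g hg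
      obtain ⟨hne, hch, hlta⟩ := hgood _ hmem
      have hlt : ∀ x ∈ l, x < i := fun x hx => hlta x hx i (by simp)
      have hcg : g.contains (key i) = true := by
        rw [PySem.Dict.contains_eq_isSome_get?, hg]; rfl
      have hcA : dA.contains (key i) = true := by
        rw [PySem.Dict.contains_eq_isSome_get?, hgetA]; rfl
      have hB : stepB key g i = g.insert (key i) (l ++ [i]) := by
        simp only [stepB, PySem.Dict.modify, PySem.Dict.getD_of_get?_eq_some g _ hg]
      have hpre := prefRun_append i l hne hch hlt
      have hphiw : phi (l ++ [i])
          = if lastIdx l + 1 = i then ((l.length : Int) + 1, prefRun l + 1, i)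
            else ((l.length : Int) + 1, prefRun l, lastIdx l) := by
        by_cases hc : l.headD 0 + prefRun l + 1 = i
        · rw [if_pos (by unfold lastIdx; omega)]
          unfold phi lastIdx
          rw [headD_append_ne l [i] 0 hne, hpre, if_pos hc]
          refine Prod.ext ?_ (Prod.ext rfl ?_)
          · simp only [List.length_append, List.length_cons, List.length_nil]
            push_cast; ring
          · simp only
            omega
        · rw [if_neg (by unfold lastIdx; omega)]
          unfold phi lastIdx
          rw [headD_append_ne l [i] 0 hne, hpre, if_neg hc]
          refine Prod.ext ?_ (Prod.ext rfl rfl)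
          simp only [List.length_append, List.length_cons, List.length_nil]
          push_cast; ring
      have hA : stepA key (dA, cnt) i
          = if lastIdx l + 1 = i then (dA.insert (key i) (phi (l ++ [i])), cnt + 1)
            else (dA.insert (key i) (phi (l ++ [i])), cnt) := by
        simp only [stepA, hgetA]
        simp only [show phi l = ((l.length : Int), prefRun l, lastIdx l) from rfl]
        by_cases h1 : lastIdx l + 1 = i
        · rw [if_pos h1, if_pos h1, hphiw, if_pos h1]
        · rw [if_neg h1, if_neg h1, hphiw, if_neg h1]
      -- facts shared by both branches
      have hitems' : (dA.insert (key i) (phi (l ++ [i]))).items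
          = (g.insert (key i) (l ++ [i])).items.map (fun p => (p.1, phi p.2)) := by
        rw [PySem.Dict.items_insert_of_contains dA _ hcA,
          PySem.Dict.items_insert_of_contains g _ hcg, h4, map_phi_upd]
      have hsum' : ((g.insert (key i) (l ++ [i])).items.map (fun p => prefRun p.2)).sum
          = (g.items.map (fun p => prefRun p.2)).sum - prefRun l + prefRun (l ++ [i]) := by
        rw [PySem.Dict.items_insert_of_contains g _ hcg]
        exact sum_update g.items (key i) l (l ++ [i]) hnd hmem
      have hnd' : ((g.insert (key i) (l ++ [i])).items.map (·.1)).Nodup := by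
        rw [PySem.Dict.items_insert_of_contains g _ hcg, map_fst_upd]
        exact hnd
      have hgood' : ∀ p ∈ (g.insert (key i) (l ++ [i])).items,
          p.2 ≠ [] ∧ p.2.IsChain (· < ·) ∧ ∀ x ∈ p.2, ∀ j ∈ rest, x < j := by
        intro p hp
        rw [PySem.Dict.items_insert_of_contains g _ hcg] at hp
        simp only [List.mem_map] at hp
        obtain ⟨q, hq, hqp⟩ := hp
        by_cases hqk : q.1 = key i
        · have hpval : p = (key i, l ++ [i]) := by rw [← hqp]; simp [hqk]
          subst hpval
          refine ⟨by simp, ?_, ?_⟩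
          · rw [List.isChain_append]
            refine ⟨hch, by simp, ?_⟩
            intro x hx y hy
            simp only [List.head?_cons, Option.mem_def, Option.some.injEq] at hy
            subst hy
            exact hlt x (List.mem_of_mem_getLast? hx)
          · intro x hx j hj
            rcases List.mem_append.1 hx with hx | hx
            · exact hlta x hx j (List.mem_cons_of_mem _ hj)
            · simp only [List.mem_singleton] at hx
              subst hx
              exact hifut j hj
        · have hpval : p = q := by rw [← hqp]; simp [beq_eq_false_iff_ne.2 hqk]
          obtain ⟨h1, h2, h3⟩ := hgood q hq
          rw [hpval]
          exact ⟨h1, h2, fun x hx j hj => h3 x hx j (List.mem_cons_of_mem _ hj)⟩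
      by_cases hcond : lastIdx l + 1 = i
      · rw [hA, if_pos hcond, hB]
        apply ih _ _ _ hpw' hnd' hgood' hitems'
        rw [hsum', hpre, if_pos (by simp only [lastIdx] at hcond; omega), h5]
        ring
      · rw [hA, if_neg hcond, hB]
        apply ih _ _ _ hpw' hnd' hgood' hitems'
        rw [hsum', hpre, if_neg (by simp only [lastIdx] at hcond; omega), h5]
        ring

-- ===== VERDICT (by name: the statement is the Claim_ definition above) =====
theorem solution_spec : Claim_equal_solution := by
  intro k score _
  unfold Spec_solution
  simp only [solution, solution_alt]
  have hfun : (fun (st : PySem.Dict Int (Int × Int × Int) × Int) (i : Int) =>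
      let gap := PySem.List.pyGetD score (i - 1) 0 - PySem.List.pyGetD score i 0
      match st.1.get? gap with
      | none => (st.1.insert gap ((1 : Int), (0 : Int), i), st.2)
      | some v =>
        if v.2.2 + 1 = i then
          (st.1.insert gap (v.1 + 1, v.2.1 + 1, i), st.2 + 1)
        else
          (st.1.insert gap (v.1 + 1, v.2.1, v.2.2), st.2))
      = stepA (fun i => PySem.List.pyGetD score (i - 1) 0 - PySem.List.pyGetD score i 0) := rfl
  have hfunB : (fun (g : PySem.Dict Int (List Int)) (i : Int) =>
      let gap := PySem.List.pyGetD score (i - 1) 0 - PySem.List.pyGetD score i 0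
      g.modify gap [] (fun l => l ++ [i]))
      = stepB (fun i => PySem.List.pyGetD score (i - 1) 0 - PySem.List.pyGetD score i 0) := rfl
  rw [hfun, hfunB]
  obtain ⟨h1, h2⟩ := loop_inv
    (fun i => PySem.List.pyGetD score (i - 1) 0 - PySem.List.pyGetD score i 0)
    (PySem.List.pyRange 1 (score.length : Int) 1)
    PySem.Dict.empty PySem.Dict.empty 0
    (PySem.List.pairwise_lt_pyRange_one 1 (score.length : Int))
    (by simp [PySem.Dict.empty])
    (by simp [PySem.Dict.empty])
    (by simp [PySem.Dict.empty])
    (by simp [PySem.Dict.empty])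
  rw [h1, h2]
  rw [PySem.List.foldl_prod_mk
    (f := fun (acc : List (Int × Int)) (idxs : List Int) => acc ++ [((idxs.length : Int), prefRun idxs)])
    (g := fun (acc : Int) (idxs : List Int) => acc + prefRun idxs)]
  rw [PySem.List.foldl_append_singleton_eq_map, PySem.List.foldl_add]
  simp only [PySem.Dict.values, List.nil_append, zero_add, List.map_map, List.foldl_map]
  congr 1
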